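-- pv_equiv track=rewrite | github.com/clarkcb/xfind | scripts/xfind.py | non_matching_lens
-- ===== SOURCE A (Python) =====
-- def lines_for_diff(lines: list[str],
--                    skip_blanks: bool = False,
--                    sort_lines: bool = False,
--                    case_insensitive_cmp: bool = False,
--                    normalize_field_names: bool = False) -> list[str]:
--     """Return lines modified according to different settings"""
--     diff_lines = lines[:]
--     if skip_blanks:
--         diff_lines = [line for line in diff_lines if line.strip() != '']
--     if sort_lines:
--         diff_lines = list(sorted(diff_lines))
--     if case_insensitive_cmp:
--         diff_lines = [line.upper() for line in diff_lines]
--     if normalize_field_names: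
--         diff_lines = [
--             line.replace('_', '').replace('-', '')
--             for line in diff_lines
--         ]
--     return diff_lines
--
-- def non_matching_lens(xfind_output: dict[str, list[str]],
--                       skip_blanks: bool = True) -> list[tuple[str, str]]:
--     """Examines xfind_output (a dict of {xfind_name : [lines]})
--        and returns a list of tuples of non-matching xfind pairs
--        ([(xfind_name_1, xfind_name_2)]
--     """
--     non_matching = []
--     xs = sorted(xfind_output.keys())
--     while xs:
--         x = xs.pop(0)
--         x_lines = lines_for_diff(xfind_output[x], skip_blanks=skip_blanks)
--         x_len = len(x_lines)
--         for y in xs: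
--             y_lines = lines_for_diff(xfind_output[y], skip_blanks=skip_blanks)
--             y_len = len(y_lines)
--             if x_len != y_len:
--                 x_and_y = tuple(sorted([x, y]))
--                 if x_and_y not in non_matching:
--                     non_matching.append(x_and_y)
--     return non_matching
-- ===== SOURCE B (Python) =====
-- def non_matching_lens(xfind_output: dict[str, list[str]],
--                       skip_blanks: bool = True) -> list[tuple[str, str]]:
--     """Group the xfind names by their processed line count, then pair up
--        names from different groups and return the pairs sorted."""
--     buckets = {}
--     for k in xfind_output:
--         lines = xfind_output[k]
--         if skip_blanks:
--             n = len([line for line in lines if line.strip() != ''])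
--         else:
--             n = len(lines)
--         buckets.setdefault(n, []).append(k)
--     groups = list(buckets.values())
--     pairs = []
--     for i, g in enumerate(groups):
--         for h in groups[i + 1:]:
--             for a in g:
--                 for b in h:
--                     pairs.append((a, b) if a < b else (b, a))
--     return sorted(pairs)
-- ===== Notes on version B (the rewrite author's own statement) =====
-- stated objective: faster
-- what changed: B groups the keys by processed line count in one pass over the dict (computing each count once), emits cross-bucket pairs, and sorts them, instead of A's nested scan that recomputes lines_for_diff for every pair and does a linear 'not in' membership test per emitted pair.
import Mathlib
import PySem

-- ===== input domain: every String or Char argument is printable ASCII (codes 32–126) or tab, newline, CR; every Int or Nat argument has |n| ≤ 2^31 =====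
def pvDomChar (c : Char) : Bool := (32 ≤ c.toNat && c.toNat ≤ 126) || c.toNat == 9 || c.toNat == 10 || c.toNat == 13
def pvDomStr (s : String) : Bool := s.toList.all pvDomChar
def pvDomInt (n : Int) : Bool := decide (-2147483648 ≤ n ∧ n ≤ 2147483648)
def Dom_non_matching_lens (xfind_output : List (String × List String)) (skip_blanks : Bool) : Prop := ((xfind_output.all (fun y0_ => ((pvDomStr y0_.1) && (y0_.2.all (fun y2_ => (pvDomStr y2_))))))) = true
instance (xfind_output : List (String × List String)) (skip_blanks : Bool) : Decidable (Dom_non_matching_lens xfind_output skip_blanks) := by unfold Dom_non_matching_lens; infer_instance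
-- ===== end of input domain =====

-- B groups the keys by processed line count once and pairs up cross-bucket keys, then sorts,
-- instead of A's nested scan that recomputes lines_for_diff per pair; return-value equivalence.

-- ===== PORT A =====
-- lines_for_diff: A calls it with only skip_blanks set; ported with all flags.
def pvLinesForDiff (lines : List String) (skip_blanks sort_lines case_insensitive_cmp normalize_field_names : Bool) : List String :=
  let d1 := if skip_blanks then lines.filter (fun line => PySem.Str.strip line != "") else lines
  let d2 := if sort_lines then PySem.List.sorted d1 (fun s => s) false else d1
  let d3 := if case_insensitive_cmp then d2.map PySem.Str.upper else d2
  if normalize_field_names then d3.map (fun line => PySem.Str.replace (PySem.Str.replace line "_" "") "-" "") else d3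

-- A's 'while xs: x = xs.pop(0); for y in xs: …' loop; d.getD x [] is exact for xfind_output[x]
-- since every x comes from d.keys (no KeyError possible).
def pvAWhile (d : PySem.Dict String (List String)) (skip_blanks : Bool) : List String → List (String × String) → List (String × String)
  | [], nm => nm
  | x :: xs, nm =>
    let x_lines := pvLinesForDiff (d.getD x []) skip_blanks false false false
    let x_len := x_lines.length
    let nm' := xs.foldl (fun nm y =>
      let y_lines := pvLinesForDiff (d.getD y []) skip_blanks false false false
      let y_len := y_lines.length
      if x_len ≠ y_len then
        let s := PySem.List.sorted [x, y] (fun t => t) false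
        let x_and_y := (s.getD 0 x, s.getD 1 y)
        if x_and_y ∉ nm then nm ++ [x_and_y] else nm
      else nm) nm
    pvAWhile d skip_blanks xs nm'

def non_matching_lens (xfind_output : List (String × List String)) (skip_blanks : Bool) : List (String × String) :=
  let d := PySem.Dict.ofList xfind_output
  let xs := PySem.List.sorted d.keys (fun s => s) false
  pvAWhile d skip_blanks xs []

-- ===== PORT B =====
def pvDiffLen (lines : List String) (skip_blanks : Bool) : Nat :=
  if skip_blanks then (lines.filter (fun line => PySem.Str.strip line != "")).length
  else lines.length

def pvNormPair (a b : String) : String × String := if a < b then (a, b) else (b, a)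

-- 'for i, g in enumerate(groups): for h in groups[i+1:]: for a in g: for b in h: pairs.append(…)'
def pvCrossPairs : List (List String) → List (String × String)
  | [] => []
  | g :: gs => gs.flatMap (fun h => g.flatMap (fun a => h.map (fun b => pvNormPair a b))) ++ pvCrossPairs gs

def non_matching_lens_alt (xfind_output : List (String × List String)) (skip_blanks : Bool) : List (String × String) :=
  let d := PySem.Dict.ofList xfind_output
  -- buckets.setdefault(n, []).append(k) mutates the bucket list in place: = modify n [] (· ++ [k])
  let buckets := d.keys.foldl
    (fun b k => b.modify (pvDiffLen (d.getD k []) skip_blanks) [] (fun g => g ++ [k]))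
    (PySem.Dict.empty : PySem.Dict Nat (List String))
  let groups := buckets.values
  PySem.List.sorted2 (pvCrossPairs groups) (fun p => p.1) (fun p => p.2) false

-- ===== PRECONDITION & SPEC =====
def Spec_non_matching_lens (xfind_output : List (String × List String)) (skip_blanks : Bool) (out : List (String × String)) : Prop := out = non_matching_lens_alt xfind_output skip_blanks
instance (xfind_output : List (String × List String)) (skip_blanks : Bool) (out : List (String × String)) : Decidable (Spec_non_matching_lens xfind_output skip_blanks out) := by unfold Spec_non_matching_lens; infer_instance

-- ===== CLAIM (what is proved, stated in full; the proofs are below) =====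
def Claim_equal_non_matching_lens : Prop := ∀ (xfind_output : List (String × List String)) (skip_blanks : Bool), Dom_non_matching_lens xfind_output skip_blanks → Spec_non_matching_lens xfind_output skip_blanks (non_matching_lens xfind_output skip_blanks)

-- ===== LEMMAS AND PROOFS =====

-- A's per-key processed line count equals B's pvDiffLen
theorem pvLinesForDiff_length (v : List String) (sb : Bool) :
    (pvLinesForDiff v sb false false false).length = pvDiffLen v sb := by
  cases sb <;> simp [pvLinesForDiff, pvDiffLen]

theorem pvSortedPair (x y : String) (h : x < y) :
    PySem.List.sorted [x, y] (fun t => t) false = [x, y] := by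
  have h2 : ¬ (y.toList < x.toList) := fun hl =>
    absurd ((String.lt_iff_toList_lt).mpr hl) (not_lt_of_gt h)
  simp [PySem.List.sorted, PySem.List.insertBy, h2]

-- canonical list of A's emitted pairs over the sorted key list
def pvPairsOf (len : String → Nat) : List String → List (String × String)
  | [] => []
  | x :: xs => (xs.filter (fun y => decide (len x ≠ len y))).map (fun y => (x, y)) ++ pvPairsOf len xs

theorem pvInner (len : String → Nat) (x : String) (ys : List String) (nm : List (String × String))
    (hnd : ys.Nodup) (hmem : ∀ p ∈ nm, p.1 ≠ x ∨ p.2 ∉ ys) :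
    ys.foldl (fun nm y => if len x ≠ len y then (if (x, y) ∉ nm then nm ++ [(x, y)] else nm) else nm) nm
      = nm ++ (ys.filter (fun y => decide (len x ≠ len y))).map (fun y => (x, y)) := by
  induction ys generalizing nm with
  | nil => simp
  | cons y ys ih =>
    obtain ⟨hy, hnd'⟩ := List.nodup_cons.mp hnd
    simp only [List.foldl_cons, List.filter_cons]
    by_cases hlen : len x ≠ len y
    · have hni : (x, y) ∉ nm := fun hin => by
        rcases hmem _ hin with h | h
        · exact h rfl
        · exact h List.mem_cons_self
      rw [if_pos hlen, if_pos hni, ih (nm ++ [(x, y)]) hnd' ?_]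
      · simp [hlen]
      · intro p hp
        rcases List.mem_append.mp hp with hp | hp
        · rcases hmem p hp with h | h
          · exact Or.inl h
          · exact Or.inr fun hm => h (List.mem_cons_of_mem _ hm)
        · simp only [List.mem_singleton] at hp
          subst hp
          exact Or.inr hy
    · rw [if_neg hlen, ih nm hnd'
        (fun p hp => (hmem p hp).imp id (fun h hm => h (List.mem_cons_of_mem _ hm)))]
      simp [hlen]

theorem pvAWhile_eq (d : PySem.Dict String (List String)) (sb : Bool) (ks : List String)
    (nm : List (String × String)) (hpw : ks.Pairwise (· < ·)) (hmem : ∀ p ∈ nm, p.1 ∉ ks) :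
    pvAWhile d sb ks nm = nm ++ pvPairsOf (fun k => pvDiffLen (d.getD k []) sb) ks := by
  induction ks generalizing nm with
  | nil => simp [pvAWhile, pvPairsOf]
  | cons x xs ih =>
    obtain ⟨hx, hpw'⟩ := List.pairwise_cons.mp hpw
    have hnd' : xs.Nodup := hpw'.imp (fun h => ne_of_lt h)
    have hstep : pvAWhile d sb (x :: xs) nm = pvAWhile d sb xs
        (xs.foldl (fun nm y =>
          if (pvLinesForDiff (d.getD x []) sb false false false).length
              ≠ (pvLinesForDiff (d.getD y []) sb false false false).length then
            if ((PySem.List.sorted [x, y] (fun t => t) false).getD 0 x,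
                (PySem.List.sorted [x, y] (fun t => t) false).getD 1 y) ∉ nm then
              nm ++ [((PySem.List.sorted [x, y] (fun t => t) false).getD 0 x,
                      (PySem.List.sorted [x, y] (fun t => t) false).getD 1 y)]
            else nm
          else nm) nm) := rfl
    have hcong := PySem.List.foldl_congr_mem xs
      (fun nm y =>
          if (pvLinesForDiff (d.getD x []) sb false false false).length
              ≠ (pvLinesForDiff (d.getD y []) sb false false false).length then
            if ((PySem.List.sorted [x, y] (fun t => t) false).getD 0 x,
                (PySem.List.sorted [x, y] (fun t => t) false).getD 1 y) ∉ nm then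
              nm ++ [((PySem.List.sorted [x, y] (fun t => t) false).getD 0 x,
                      (PySem.List.sorted [x, y] (fun t => t) false).getD 1 y)]
            else nm
          else nm)
      (fun nm y => if (fun k => pvDiffLen (d.getD k []) sb) x ≠ (fun k => pvDiffLen (d.getD k []) sb) y then
          (if (x, y) ∉ nm then nm ++ [(x, y)] else nm) else nm) nm
      (by
        intro acc y hy
        simp [pvLinesForDiff_length, pvSortedPair x y (hx y hy)])
    have hfold := pvInner (fun k => pvDiffLen (d.getD k []) sb) x xs nm hnd'
      (fun p hp => Or.inl (fun he => hmem p hp (he ▸ List.mem_cons_self)))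
    rw [hstep, hcong, hfold, ih _ hpw' ?_]
    · simp [pvPairsOf]
    · intro p hp
      rcases List.mem_append.mp hp with hp | hp
      · exact fun hin => hmem p hp (List.mem_cons_of_mem _ hin)
      · obtain ⟨y, _, rfl⟩ := List.mem_map.mp hp
        exact fun hin => absurd (hx x hin) (lt_irrefl x)

theorem mem_pvPairsOf (len : String → Nat) (ks : List String) (hpw : ks.Pairwise (· < ·))
    (p : String × String) :
    p ∈ pvPairsOf len ks ↔ p.1 ∈ ks ∧ p.2 ∈ ks ∧ p.1 < p.2 ∧ len p.1 ≠ len p.2 := by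
  obtain ⟨p1, p2⟩ := p
  induction ks with
  | nil => simp [pvPairsOf]
  | cons x xs ih =>
    obtain ⟨hx, hpw'⟩ := List.pairwise_cons.mp hpw
    simp only [pvPairsOf, List.mem_append, List.mem_map, List.mem_filter, ih hpw',
      List.mem_cons, decide_eq_true_eq]
    constructor
    · rintro (⟨y, ⟨hy, hlen⟩, heq⟩ | ⟨h1, h2, h3, h4⟩)
      · obtain ⟨rfl, rfl⟩ := Prod.mk.injEq .. ▸ heq
        exact ⟨Or.inl rfl, Or.inr hy, hx _ hy, hlen⟩
      · exact ⟨Or.inr h1, Or.inr h2, h3, h4⟩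
    · rintro ⟨h1, h2, h3, h4⟩
      rcases h1 with rfl | h1
      · rcases h2 with rfl | h2
        · exact absurd h3 (lt_irrefl _)
        · exact Or.inl ⟨p2, ⟨h2, h4⟩, rfl⟩
      · rcases h2 with rfl | h2
        · exact absurd h3 (not_lt_of_gt (hx _ h1))
        · exact Or.inr ⟨h1, h2, h3, h4⟩

theorem pvPairsOf_lex (len : String → Nat) (ks : List String) (hpw : ks.Pairwise (· < ·)) :
    (pvPairsOf len ks).Pairwise (fun p q => p.1 < q.1 ∨ (p.1 = q.1 ∧ p.2 < q.2)) := by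
  induction ks with
  | nil => simp [pvPairsOf]
  | cons x xs ih =>
    obtain ⟨hx, hpw'⟩ := List.pairwise_cons.mp hpw
    rw [pvPairsOf, List.pairwise_append]
    refine ⟨?_, ih hpw', ?_⟩
    · rw [List.pairwise_map]
      exact (hpw'.filter _).imp (fun h => Or.inr ⟨rfl, h⟩)
    · intro a ha b hb
      obtain ⟨y, _, rfl⟩ := List.mem_map.mp ha
      exact Or.inl (hx _ ((mem_pvPairsOf len xs hpw' b).mp hb).1)

theorem pvSorted2_eq_of_perm_of_pairwise_lex (xs ys : List (String × String))
    (hperm : ys.Perm xs)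
    (hpw : ys.Pairwise (fun p q => p.1 < q.1 ∨ (p.1 = q.1 ∧ p.2 < q.2))) :
    PySem.List.sorted2 xs (fun p => p.1) (fun p => p.2) false = ys := by
  have hbe : (fun a b : String × String => decide (a.1 < b.1) || (!decide (b.1 < a.1) && decide (a.2 < b.2)))
      = (fun a b : String × String => decide ((toLex a : Lex (String × String)) < toLex b)) := by
    funext a b
    rcases lt_trichotomy a.1 b.1 with h | h | h
    · simp [Prod.Lex.lt_iff, h, not_lt_of_gt h]
    · simp [Prod.Lex.lt_iff, h]
    · simp [Prod.Lex.lt_iff, h, not_lt_of_gt h, ne_of_gt h]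
  have hs := PySem.List.sorted_eq_of_perm_of_pairwise_lt xs ys
    (fun p => (toLex p : Lex (String × String))) hperm
    (hpw.imp (fun h => by rw [Prod.Lex.lt_iff]; simpa using h))
  simp only [PySem.List.sorted2, PySem.List.sorted] at hs ⊢
  rw [hbe]
  simpa using hs

theorem pvGroupFold_getD (l : List String) (key : String → Nat) (b : PySem.Dict Nat (List String)) (n : Nat) :
    (l.foldl (fun b k => b.modify (key k) [] (fun g => g ++ [k])) b).getD n []
      = b.getD n [] ++ l.filter (fun k => key k == n) := by
  induction l generalizing b with
  | nil => simp
  | cons k l ih =>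
    simp only [List.foldl_cons, List.filter_cons]
    rw [ih]
    by_cases h : key k = n
    · subst h; rw [PySem.Dict.getD_modify_self]; simp
    · rw [PySem.Dict.getD_modify_of_ne _ _ _ (fun hc => h hc.symm)]
      simp [h]

theorem pvNormPair_comm (a b : String) (h : a ≠ b) : pvNormPair a b = pvNormPair b a := by
  unfold pvNormPair
  rcases lt_trichotomy a b with hl | hl | hl
  · simp [hl, not_lt_of_gt hl]
  · exact absurd hl h
  · simp [hl, not_lt_of_gt hl]

theorem pvNormPair_cases (a b a' b' : String) (h : pvNormPair a b = pvNormPair a' b') :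
    (a = a' ∧ b = b') ∨ (a = b' ∧ b = a') := by
  unfold pvNormPair at h
  split_ifs at h <;> simp only [Prod.mk.injEq] at h <;> tauto

theorem mem_pvCrossPairs (l : List String) (key : String → Nat) (ns : List Nat)
    (hnd : ns.Nodup) (p : String × String) :
    p ∈ pvCrossPairs (ns.map (fun n => l.filter (fun k => key k == n)))
      ↔ ∃ a b, a ∈ l ∧ b ∈ l ∧ key a ∈ ns ∧ key b ∈ ns ∧ key a ≠ key b ∧ p = pvNormPair a b := by
  induction ns with
  | nil => simp [pvCrossPairs]
  | cons n ns ih =>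
    obtain ⟨hn, hnd'⟩ := List.nodup_cons.mp hnd
    simp only [List.map_cons, pvCrossPairs, List.mem_append, ih hnd']
    constructor
    · rintro (ha | ⟨a, b, ha, hb, hka, hkb, hne, rfl⟩)
      · simp only [List.mem_flatMap, List.mem_map, List.mem_filter, beq_iff_eq] at ha
        obtain ⟨h', ⟨m, hm, rfl⟩, a, ⟨hal, hka⟩, b, hbf, rfl⟩ := ha
        obtain ⟨hbl, hkb⟩ := List.mem_filter.mp hbf
        rw [beq_iff_eq] at hkb
        refine ⟨a, b, hal, hbl, ?_, ?_, ?_, rfl⟩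
        · rw [hka]; exact List.mem_cons_self
        · rw [hkb]; exact List.mem_cons_of_mem _ hm
        · rw [hka, hkb]; exact fun he => hn (he ▸ hm)
      · exact ⟨a, b, ha, hb, List.mem_cons_of_mem _ hka, List.mem_cons_of_mem _ hkb, hne, rfl⟩
    · rintro ⟨a, b, ha, hb, hka, hkb, hne, rfl⟩
      rcases List.mem_cons.mp hka with hka1 | hka2
      · rcases List.mem_cons.mp hkb with hkb1 | hkb2
        · exact absurd (hka1.trans hkb1.symm) hne
        · left
          simp only [List.mem_flatMap, List.mem_map, List.mem_filter, beq_iff_eq]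
          exact ⟨l.filter (fun k => key k == key b), ⟨key b, hkb2, rfl⟩, a, ⟨ha, hka1⟩, b,
            List.mem_filter.mpr ⟨hb, by simp⟩, rfl⟩
      · rcases List.mem_cons.mp hkb with hkb1 | hkb2
        · left
          simp only [List.mem_flatMap, List.mem_map, List.mem_filter, beq_iff_eq]
          exact ⟨l.filter (fun k => key k == key a), ⟨key a, hka2, rfl⟩, b, ⟨hb, hkb1⟩, a,
            List.mem_filter.mpr ⟨ha, by simp⟩,
            (pvNormPair_comm a b (fun he => hne (congrArg key he))).symm⟩
        · exact Or.inr ⟨a, b, ha, hb, hka2, hkb2, hne, rfl⟩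

theorem nodup_pvCrossPairs (l : List String) (key : String → Nat) (ns : List Nat)
    (hndl : l.Nodup) (hnd : ns.Nodup) :
    (pvCrossPairs (ns.map (fun n => l.filter (fun k => key k == n)))).Nodup := by
  induction ns with
  | nil => simp [pvCrossPairs]
  | cons n ns ih =>
    obtain ⟨hn, hnd'⟩ := List.nodup_cons.mp hnd
    simp only [List.map_cons, pvCrossPairs]
    rw [List.nodup_append]
    refine ⟨?_, ih hnd', ?_⟩
    · -- the head block: pairs of (bucket n) × (bucket m) for m ∈ ns, is Nodup
      rw [List.nodup_flatMap]
      constructor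
      · intro h' hh'
        obtain ⟨m, hm, rfl⟩ := List.mem_map.mp hh'
        have hmn : m ≠ n := fun he => hn (he ▸ hm)
        rw [List.nodup_flatMap]
        constructor
        · intro a hafil
          obtain ⟨hal, hka⟩ := List.mem_filter.mp hafil
          rw [beq_iff_eq] at hka
          refine List.Nodup.map_on ?_ (hndl.filter _)
          intro b1 hb1 b2 hb2 heq
          obtain ⟨_, hkb1⟩ := List.mem_filter.mp hb1
          obtain ⟨_, hkb2⟩ := List.mem_filter.mp hb2
          rw [beq_iff_eq] at hkb1 hkb2
          rcases pvNormPair_cases a b1 a b2 heq with ⟨_, h2⟩ | ⟨h1, _⟩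
          · exact h2
          · exact absurd (by rw [← hkb2, ← h1, hka] : m = n) hmn
        · refine List.Pairwise.imp_of_mem ?_ ((hndl.filter _) : List.Pairwise _ _)
          intro a1 a2 ha1 ha2 hne12 p hp1 hp2
          obtain ⟨_, hka1⟩ := List.mem_filter.mp ha1
          obtain ⟨_, hka2⟩ := List.mem_filter.mp ha2
          rw [beq_iff_eq] at hka1 hka2
          obtain ⟨b1, hb1, rfl⟩ := List.mem_map.mp hp1
          obtain ⟨b2, hb2, heq⟩ := List.mem_map.mp hp2
          obtain ⟨_, hkb1⟩ := List.mem_filter.mp hb1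
          rw [beq_iff_eq] at hkb1
          rcases pvNormPair_cases a2 b2 a1 b1 heq with ⟨h1, _⟩ | ⟨h1, _⟩
          · exact hne12 h1.symm
          · exact hmn (by rw [← hkb1, ← h1, hka2] : m = n)
      · rw [List.pairwise_map]
        refine List.Pairwise.imp_of_mem ?_ (hnd' : List.Pairwise _ _)
        intro m1 m2 hm1 hm2 hne12 p hp1 hp2
        simp only [List.mem_flatMap, List.mem_map, List.mem_filter, beq_iff_eq] at hp1 hp2
        obtain ⟨a1, ⟨_, hka1⟩, b1, ⟨_, hkb1⟩, rfl⟩ := hp1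
        obtain ⟨a2, ⟨_, hka2⟩, b2, ⟨_, hkb2⟩, heq⟩ := hp2
        have hm1n : m1 ≠ n := fun he => hn (he ▸ hm1)
        rcases pvNormPair_cases a2 b2 a1 b1 heq with ⟨_, h2⟩ | ⟨h1, _⟩
        · exact hne12 (by rw [← hkb1, ← h2, hkb2] : m1 = m2)
        · exact hm1n (by rw [← hkb1, ← h1, hka2] : m1 = n)
    · -- head block is disjoint from the pairs of the remaining buckets
      intro p hp1 q hq2
      obtain ⟨a', b', _, _, hka', hkb', _, rfl⟩ := (mem_pvCrossPairs l key ns hnd' q).mp hq2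
      simp only [List.mem_flatMap, List.mem_map, List.mem_filter, beq_iff_eq] at hp1
      obtain ⟨h', ⟨m, hm, rfl⟩, a, ⟨_, hka⟩, b, hbf, rfl⟩ := hp1
      intro heq
      rcases pvNormPair_cases a b a' b' heq with ⟨h1, _⟩ | ⟨h1, _⟩
      · exact hn (by rw [← hka, h1]; exact hka')
      · exact hn (by rw [← hka, h1]; exact hkb')

-- ===== VERDICT (by name: the statement is the Claim_ definition above) =====
theorem non_matching_lens_spec : Claim_equal_non_matching_lens := by
  unfold Claim_equal_non_matching_lens
  intro xo sb _
  unfold Spec_non_matching_lens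
  set d : PySem.Dict String (List String) := PySem.Dict.ofList xo with hd
  set len : String → Nat := fun k => pvDiffLen (d.getD k []) sb with hlenv
  set ks : List String := PySem.List.sorted d.keys (fun s => s) false with hks
  set buckets : PySem.Dict Nat (List String) :=
    d.keys.foldl (fun b k => b.modify (len k) [] (fun g => g ++ [k])) PySem.Dict.empty with hbuck
  have hkn : d.keys.Nodup := PySem.Dict.nodup_keys_ofList xo
  have hksnd : ks.Nodup := ((PySem.List.sorted_perm d.keys (fun s => s) false).nodup_iff).mpr hkn
  have hpw : ks.Pairwise (· < ·) :=
    ((PySem.List.sorted_pairwise d.keys (fun s => s)).and (hksnd : List.Pairwise _ _)).imp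
      (fun h => lt_of_le_of_ne h.1 h.2)
  have hnsnd : buckets.keys.Nodup :=
    PySem.Dict.nodup_keys_foldl_modify_key d.keys len [] (fun _ k g => g ++ [k])
      PySem.Dict.empty (by rw [PySem.Dict.keys_empty]; exact List.nodup_nil)
  have hkeys : buckets.keys = PySem.Set.update
      (PySem.Dict.empty : PySem.Dict Nat (List String)).keys (d.keys.map len) :=
    PySem.Dict.keys_foldl_modify_key d.keys len [] (fun _ k g => g ++ [k]) PySem.Dict.empty
  have hnsmem : ∀ m, m ∈ buckets.keys ↔ ∃ k ∈ d.keys, len k = m := by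
    intro m
    rw [hkeys, PySem.Set.mem_update, PySem.Dict.keys_empty]
    simp [List.mem_map]
  have hvals : buckets.values = buckets.keys.map (fun n => d.keys.filter (fun k => len k == n)) := by
    rw [PySem.Dict.values_eq_map_keys buckets hnsnd []]
    refine List.map_congr_left ?_
    intro n _
    rw [hbuck, pvGroupFold_getD d.keys len PySem.Dict.empty n, PySem.Dict.getD_empty]
    simp
  have hA : non_matching_lens xo sb = pvPairsOf len ks := by
    have h0 : non_matching_lens xo sb = pvAWhile d sb ks [] := rfl
    rw [h0, pvAWhile_eq d sb ks [] hpw (by simp)]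
    simp [hlenv]
  have hB : non_matching_lens_alt xo sb
      = PySem.List.sorted2
          (pvCrossPairs (buckets.keys.map (fun n => d.keys.filter (fun k => len k == n))))
          (fun p => p.1) (fun p => p.2) false := by
    have h0 : non_matching_lens_alt xo sb
        = PySem.List.sorted2 (pvCrossPairs buckets.values) (fun p => p.1) (fun p => p.2) false := rfl
    rw [h0, hvals]
  have hiff : ∀ p, p ∈ pvPairsOf len ks
      ↔ p ∈ pvCrossPairs (buckets.keys.map (fun n => d.keys.filter (fun k => len k == n))) := by
    intro p
    rw [mem_pvPairsOf len ks hpw p, mem_pvCrossPairs d.keys len buckets.keys hnsnd p]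
    constructor
    · rintro ⟨h1, h2, h3, h4⟩
      have hk1 : p.1 ∈ d.keys := (PySem.List.mem_sorted d.keys (fun s => s) false p.1).mp h1
      have hk2 : p.2 ∈ d.keys := (PySem.List.mem_sorted d.keys (fun s => s) false p.2).mp h2
      refine ⟨p.1, p.2, hk1, hk2, (hnsmem _).mpr ⟨p.1, hk1, rfl⟩, (hnsmem _).mpr ⟨p.2, hk2, rfl⟩, h4, ?_⟩
      rw [pvNormPair, if_pos h3]
    · rintro ⟨a, b, ha, hb, _, _, hne, rfl⟩
      have hab : a ≠ b := fun he => hne (congrArg len he)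
      have ha' : a ∈ ks := (PySem.List.mem_sorted d.keys (fun s => s) false a).mpr ha
      have hb' : b ∈ ks := (PySem.List.mem_sorted d.keys (fun s => s) false b).mpr hb
      rcases lt_trichotomy a b with h | h | h
      · rw [pvNormPair, if_pos h]
        exact ⟨ha', hb', h, hne⟩
      · exact absurd h hab
      · rw [pvNormPair, if_neg (not_lt_of_gt h)]
        exact ⟨hb', ha', h, fun he => hne he.symm⟩
  have hAnodup : (pvPairsOf len ks).Nodup :=
    (pvPairsOf_lex len ks hpw).imp (fun {p q} h he => by
      subst he
      rcases h with h | ⟨_, h⟩ <;> exact lt_irrefl _ h)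
  have hBnodup := nodup_pvCrossPairs d.keys len buckets.keys hkn hnsnd
  have hperm : (pvPairsOf len ks).Perm
      (pvCrossPairs (buckets.keys.map (fun n => d.keys.filter (fun k => len k == n)))) :=
    (List.perm_ext_iff_of_nodup hAnodup hBnodup).mpr hiff
  rw [hA, hB]
  exact (pvSorted2_eq_of_perm_of_pairwise_lex
    (pvCrossPairs (buckets.keys.map (fun n => d.keys.filter (fun k => len k == n))))
    (pvPairsOf len ks) hperm (pvPairsOf_lex len ks hpw)).symm
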